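-- pv_equiv track=rewrite | github.com/congruili/NLP-Cluster-Labeling-project | warp_learn/evals.py | hit_rank
-- ===== SOURCE A (Python) =====
-- def hit_rank(true, pred):
--     if isinstance(true, str):
--         true = [true]
--     elif isinstance(true, (list, tuple)):
--         pass
--     else:
--         raise TypeError('Unknown argument true:%s' % true)
--
--     true_labels = list(set([y.lower() for x in true for y in x.split(':')]))
--     rank = float('inf')
--     for each in true_labels:
--         if each in pred:
--             tmp = pred.index(each)
--             if rank > tmp:
--                 rank = tmp
--     return rank if rank != float('inf') else None
-- ===== SOURCE B (Python) =====
-- def hit_rank(true, pred):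
--     if isinstance(true, str):
--         true = [true]
--     elif not isinstance(true, (list, tuple)):
--         raise TypeError('Unknown argument true:%s' % true)
--     true_set = {y.lower() for x in true for y in x.split(':')}
--     for i, x in enumerate(pred):
--         if x in true_set:
--             return i
--     return None
-- ===== Notes on version B (the rewrite author's own statement) =====
-- stated objective: faster
-- what changed: Replaces A's loop over every true sub-label with repeated 'in pred'/'pred.index' scans by a single forward pass over pred with an O(1) set membership test, returning the first hit (which is the minimum index by construction).
import Mathlib
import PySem

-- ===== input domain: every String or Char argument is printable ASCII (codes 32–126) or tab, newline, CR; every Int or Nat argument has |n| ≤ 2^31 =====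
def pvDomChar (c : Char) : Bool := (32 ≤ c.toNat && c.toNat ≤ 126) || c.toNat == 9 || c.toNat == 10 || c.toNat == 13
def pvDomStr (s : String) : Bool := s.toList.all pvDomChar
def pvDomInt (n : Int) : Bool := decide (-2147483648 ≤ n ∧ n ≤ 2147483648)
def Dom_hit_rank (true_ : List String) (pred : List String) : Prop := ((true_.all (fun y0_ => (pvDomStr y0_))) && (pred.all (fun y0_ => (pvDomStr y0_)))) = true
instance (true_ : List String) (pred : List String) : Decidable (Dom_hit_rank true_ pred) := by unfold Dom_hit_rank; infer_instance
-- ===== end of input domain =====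

-- B replaces A's per-label 'in pred'/'pred.index' scans by one forward pass over pred with a set
-- membership test (objective: faster). Equivalence is about the return value only.

-- ===== PORT A =====
-- list(set(...)) is ported as PySem.Set.ofList; CPython's set iteration order is arbitrary, but the
-- min-index result below is independent of the order of true_labels.
-- float('inf') (the 'no hit yet' sentinel) is ported as none of Option Int; 'rank > tmp' is true at the
-- sentinel and is the integer comparison otherwise — exact, since rank is otherwise always an index.
def hit_rank (true_ : List String) (pred : List String) : Option Int :=
  let true_labels : List String :=
    PySem.Set.ofList (true_.flatMap (fun x => ((PySem.Str.split? x ":").getD []).map PySem.Str.lower))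
  let rank : Option Int := true_labels.foldl (fun rank each =>
    if each ∈ pred then
      match PySem.List.index? pred each with
      | some tmp => if (match rank with | none => true | some v => decide ((tmp : Int) < v)) then some (tmp : Int) else rank
      | none => rank   -- unreachable: each ∈ pred
    else rank) none
  rank

-- ===== PORT B =====
def hit_rank_altGo (s : PySem.Set String) (xs : List String) (i : Int) : Option Int :=
  match xs with
  | [] => none
  | x :: t => if PySem.Set.contains s x then some i else hit_rank_altGo s t (i + 1)

def hit_rank_alt (true_ : List String) (pred : List String) : Option Int :=
  let true_set : PySem.Set String :=
    PySem.Set.ofList (true_.flatMap (fun x => ((PySem.Str.split? x ":").getD []).map PySem.Str.lower))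
  hit_rank_altGo true_set pred 0

-- ===== PRECONDITION & SPEC =====
def Spec_hit_rank (true_ : List String) (pred : List String) (out : Option Int) : Prop := out = hit_rank_alt true_ pred
instance (true_ : List String) (pred : List String) (out : Option Int) : Decidable (Spec_hit_rank true_ pred out) := by unfold Spec_hit_rank; infer_instance

-- ===== CLAIM (what is proved, stated in full; the proofs are below) =====
def Claim_equal_hit_rank : Prop := ∀ (true_ : List String) (pred : List String), Dom_hit_rank true_ pred → Spec_hit_rank true_ pred (hit_rank true_ pred)

-- ===== LEMMAS AND PROOFS =====

-- index (0-based) of the first element of the list satisfying p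
def natFirst (p : String → Bool) : List String → Option Nat
  | [] => none
  | x :: xs => if p x then some 0 else (natFirst p xs).map (· + 1)

def nmin : Option Nat → Option Nat → Option Nat
  | none, b => b
  | a, none => a
  | some x, some y => some (min x y)

theorem nmin_none_right (a : Option Nat) : nmin a none = a := by cases a <;> rfl

theorem nmin_comm (a b : Option Nat) : nmin a b = nmin b a := by
  cases a <;> cases b <;> simp [nmin, Nat.min_comm]

theorem nmin_assoc (a b c : Option Nat) : nmin (nmin a b) c = nmin a (nmin b c) := by
  cases a <;> cases b <;> cases c <;> simp [nmin, Nat.min_assoc]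

theorem natFirst_congr (p q : String → Bool) (xs : List String)
    (h : ∀ x ∈ xs, p x = q x) : natFirst p xs = natFirst q xs := by
  induction xs with
  | nil => rfl
  | cons x t ih =>
      simp only [natFirst, h x (List.mem_cons_self), ih (fun y hy => h y (List.mem_cons_of_mem _ hy))]

theorem natFirst_false (xs : List String) : natFirst (fun _ => false) xs = none := by
  induction xs with
  | nil => rfl
  | cons x t ih => simp [natFirst, ih]

theorem natFirst_or (p q : String → Bool) (xs : List String) :
    natFirst (fun x => p x || q x) xs = nmin (natFirst p xs) (natFirst q xs) := by
  induction xs with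
  | nil => rfl
  | cons x t ih =>
      by_cases hp : p x
      · have hL : natFirst (fun x => p x || q x) (x :: t) = some 0 := by simp [natFirst, hp]
        have hP : natFirst p (x :: t) = some 0 := by simp [natFirst, hp]
        rw [hL, hP]
        cases natFirst q (x :: t) <;> simp [nmin]
      · by_cases hq : q x
        · simp only [natFirst, hp, hq, Bool.false_or, if_true]
          cases h : natFirst p t <;> simp [nmin]
        · simp only [natFirst, hp, hq, Bool.false_or, ih]
          cases h1 : natFirst p t <;> cases h2 : natFirst q t <;> simp [nmin]

theorem index?_eq_natFirst (pred : List String) (v : String) :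
    PySem.List.index? pred v = natFirst (fun x => decide (x = v)) pred := by
  induction pred with
  | nil => rfl
  | cons x t ih =>
      by_cases h : x = v
      · subst h; rw [PySem.List.index?_cons_self]; simp [natFirst]
      · rw [PySem.List.index?_cons_of_ne t h, ih]; simp [natFirst, h]

-- the minimum, over the labels, of each label's first index in pred
def bestOf (pred : List String) : List String → Option Nat
  | [] => none
  | e :: L => nmin (PySem.List.index? pred e) (bestOf pred L)

theorem bestOf_eq_natFirst (pred L : List String) :
    bestOf pred L = natFirst (fun x => decide (x ∈ L)) pred := by
  induction L with
  | nil => simp [bestOf, natFirst_false]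
  | cons e L ih =>
      rw [bestOf, ih, index?_eq_natFirst, ← natFirst_or]
      apply natFirst_congr
      intro x _
      simp [List.mem_cons]

-- A's loop step, named so the fold can be reasoned about
def aStep (pred : List String) (rank : Option Int) (each : String) : Option Int :=
  if each ∈ pred then
    match PySem.List.index? pred each with
    | some tmp => if (match rank with | none => true | some v => decide ((tmp : Int) < v)) then some (tmp : Int) else rank
    | none => rank
  else rank

theorem aStep_eq (pred : List String) (r : Option Nat) (e : String) :
    aStep pred (r.map (fun n => (n : Int))) e
      = (nmin (PySem.List.index? pred e) r).map (fun n => (n : Int)) := by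
  by_cases h : e ∈ pred
  · obtain ⟨k, hk⟩ := Option.isSome_iff_exists.mp ((PySem.List.index?_isSome_iff pred e).mpr h)
    rw [aStep, if_pos h, hk]
    cases r with
    | none => simp [nmin]
    | some v =>
        simp only [nmin]
        by_cases hlt : k < v
        · have h' : (k : Int) < (v : Int) := by exact_mod_cast hlt
          simp [h', Nat.min_eq_left (Nat.le_of_lt hlt)]
        · have h' : ¬ ((k : Int) < (v : Int)) := by exact_mod_cast hlt
          simp [h', Nat.min_eq_right (Nat.le_of_not_lt hlt)]
  · have hnone : PySem.List.index? pred e = none := (PySem.List.index?_eq_none_iff pred e).mpr h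
    rw [aStep, if_neg h, hnone]
    cases r <;> simp [nmin]

theorem foldl_aStep (pred : List String) (L : List String) (r : Option Nat) :
    L.foldl (aStep pred) (r.map (fun n => (n : Int)))
      = (nmin r (bestOf pred L)).map (fun n => (n : Int)) := by
  induction L generalizing r with
  | nil => simp [bestOf, nmin_none_right]
  | cons e L ih =>
      rw [List.foldl_cons, aStep_eq, ih, bestOf]
      rw [show nmin (PySem.List.index? pred e) r = nmin r (PySem.List.index? pred e) from nmin_comm _ _,
          nmin_assoc]

theorem hit_rank_eq (true_ pred : List String) :
    hit_rank true_ pred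
      = (natFirst (fun x => decide (x ∈ PySem.Set.ofList
          (true_.flatMap (fun x => ((PySem.Str.split? x ":").getD []).map PySem.Str.lower)))) pred).map
          (fun n => (n : Int)) := by
  show (PySem.Set.ofList _ : List String).foldl (aStep pred) ((none : Option Nat).map (fun n => (n : Int))) = _
  rw [foldl_aStep, bestOf_eq_natFirst]
  rfl

theorem altGo_eq (s : PySem.Set String) (xs : List String) (i : Int) :
    hit_rank_altGo s xs i
      = (natFirst (fun x => PySem.Set.contains s x) xs).map (fun n => i + (n : Int)) := by
  induction xs generalizing i with
  | nil => rfl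
  | cons x t ih =>
      rw [hit_rank_altGo]
      by_cases h : PySem.Set.contains s x = true
      · rw [if_pos h]
        have h' : x ∈ (s : List String) := by simpa using h
        simp [natFirst, h']
      · rw [if_neg h, ih]
        simp only [natFirst, h, Bool.false_eq_true, if_false]
        cases hn : natFirst (fun x => PySem.Set.contains s x) t <;> (simp; try omega)

theorem contains_eq_mem (s : PySem.Set String) (x : String) :
    PySem.Set.contains s x = decide (x ∈ (s : List String)) := by
  simp [PySem.Set.contains]

-- ===== VERDICT (by name: the statement is the Claim_ definition above) =====
theorem hit_rank_spec : Claim_equal_hit_rank := by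
  intro true_ pred _
  show hit_rank true_ pred = hit_rank_alt true_ pred
  rw [hit_rank_eq]
  show _ = hit_rank_altGo _ pred 0
  rw [altGo_eq]
  rw [natFirst_congr _ _ pred (fun x _ => (contains_eq_mem _ x).symm)]
  cases hn : natFirst _ pred <;> simp
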